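-- pv_equiv track=rewrite | github.com/LeYangNwpu/CodeCraft | contest/Google_2018_1118_RoundH/A-Big_Buttons/Big_Button.py | filter_forb
-- ===== SOURCE A (Python) =====
-- def filter_forb(seqs_all, seqs_forb):
--     count = 0
--     for temps in seqs_all:
--         flag = True
--         for forbs in seqs_forb:
--             seq_cmp = temps[:len(forbs)]
--             if seq_cmp == forbs:
--                 flag = False
--                 break
--         if not flag:
--             count += 1
--     return len(seqs_all)-count
-- ===== SOURCE B (Python) =====
-- def filter_forb(seqs_all, seqs_forb):
--     # Different algorithm: hash-set of forbidden strings; walk each sequence's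
--     # prefixes and test membership, instead of scanning the forbidden list per sequence.
--     forb = set(seqs_forb)
--     count = 0
--     for s in seqs_all:
--         ok = True
--         for k in range(len(s) + 1):
--             if s[:k] in forb:
--                 ok = False
--                 break
--         if ok:
--             count += 1
--     return count
-- ===== Notes on version B (the rewrite author's own statement) =====
-- stated objective: faster
-- what changed: B builds a hash set of the forbidden strings once and tests each sequence's prefixes for membership (counting the allowed sequences directly), instead of scanning the whole forbidden list and slicing for every sequence as A does.
import Mathlib
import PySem

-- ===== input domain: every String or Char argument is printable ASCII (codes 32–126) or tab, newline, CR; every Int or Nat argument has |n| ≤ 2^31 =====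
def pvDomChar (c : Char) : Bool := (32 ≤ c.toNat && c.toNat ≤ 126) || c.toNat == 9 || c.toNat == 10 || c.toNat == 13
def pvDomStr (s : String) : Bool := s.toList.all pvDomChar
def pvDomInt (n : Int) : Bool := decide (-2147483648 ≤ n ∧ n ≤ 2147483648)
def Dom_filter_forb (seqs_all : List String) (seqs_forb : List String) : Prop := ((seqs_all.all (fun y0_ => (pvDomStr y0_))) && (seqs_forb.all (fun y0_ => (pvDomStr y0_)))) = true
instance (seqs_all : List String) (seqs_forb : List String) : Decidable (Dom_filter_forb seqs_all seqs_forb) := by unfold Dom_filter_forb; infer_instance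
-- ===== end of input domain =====

-- ===== PORT A =====
-- B changes the algorithm (hash set of forbidden strings, prefix walk); header: B is the faster re-implementation.
-- temps[:len(forbs)] with a nonnegative bound is exactly List.take on the character list.
def pvAFlag (t : List Char) : List String → Bool
  | [] => true
  | f :: rest => if t.take f.toList.length == f.toList then false else pvAFlag t rest

def filter_forb (seqs_all : List String) (seqs_forb : List String) : Int :=
  let count : Int := seqs_all.foldl (fun c temps => if pvAFlag temps.toList seqs_forb then c else c + 1) 0
  (seqs_all.length : Int) - count

-- ===== PORT B =====
-- range(len(s)+1) over a nonnegative bound is exactly List.range (len+1); s[:k] is take k.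
def pvBAllowed (forb : PySem.Set (List Char)) (t : List Char) : Bool :=
  (List.range (t.length + 1)).all (fun k => !(forb.contains (t.take k)))

def filter_forb_alt (seqs_all : List String) (seqs_forb : List String) : Int :=
  let forb : PySem.Set (List Char) := PySem.Set.ofList (seqs_forb.map String.toList)
  seqs_all.foldl (fun c s => if pvBAllowed forb s.toList then c + 1 else c) 0

-- ===== PRECONDITION & SPEC =====
def Spec_filter_forb (seqs_all : List String) (seqs_forb : List String) (out : Int) : Prop := out = filter_forb_alt seqs_all seqs_forb
instance (seqs_all : List String) (seqs_forb : List String) (out : Int) : Decidable (Spec_filter_forb seqs_all seqs_forb out) := by unfold Spec_filter_forb; infer_instance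

-- ===== CLAIM (what is proved, stated in full; the proofs are below) =====
def Claim_equal_filter_forb : Prop := ∀ (seqs_all : List String) (seqs_forb : List String), Dom_filter_forb seqs_all seqs_forb → Spec_filter_forb seqs_all seqs_forb (filter_forb seqs_all seqs_forb)

-- ===== LEMMAS AND PROOFS =====

-- A's inner loop flags exactly the sequences having some forbidden string as value of temps[:len(f)].
lemma pvAFlag_eq_false_iff (t : List Char) (forb : List String) :
    pvAFlag t forb = false ↔ ∃ f ∈ forb, t.take f.toList.length = f.toList := by
  induction forb with
  | nil => simp [pvAFlag]
  | cons f rest ih =>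
    by_cases h : t.take f.toList.length = f.toList
    · constructor
      · intro _; exact ⟨f, List.mem_cons_self, h⟩
      · intro _; simp only [pvAFlag, h, beq_self_eq_true, if_true]
    · have hstep : pvAFlag t (f :: rest) = pvAFlag t rest := by
        simp only [pvAFlag, beq_iff_eq, if_neg h]
      rw [hstep, ih]
      constructor
      · rintro ⟨g, hg, he⟩; exact ⟨g, List.mem_cons_of_mem _ hg, he⟩
      · rintro ⟨g, hg, he⟩
        rcases List.mem_cons.1 hg with rfl | hg'
        · exact absurd he h
        · exact ⟨g, hg', he⟩

-- B's inner loop allows exactly the sequences none of whose prefixes is forbidden.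
lemma pvBAllowed_eq_true_iff (forb : List String) (t : List Char) :
    pvBAllowed (PySem.Set.ofList (forb.map String.toList)) t = true ↔
      ∀ k ≤ t.length, ¬ (t.take k ∈ forb.map String.toList) := by
  simp [pvBAllowed, List.all_eq_true, PySem.Set.contains, PySem.Set.mem_ofList, List.mem_range]

-- Pointwise: A's flag equals B's allowed test.
lemma pvFlag_eq_allowed (forb : List String) (t : List Char) :
    pvAFlag t forb = pvBAllowed (PySem.Set.ofList (forb.map String.toList)) t := by
  by_cases h : pvAFlag t forb = true
  · rw [h]
    symm
    rw [pvBAllowed_eq_true_iff]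
    intro k hk hmem
    rcases List.mem_map.1 hmem with ⟨f, hf, hfe⟩
    have hlen : f.toList.length = k := by
      have := congrArg List.length hfe
      rw [List.length_take] at this
      omega
    have hfalse : pvAFlag t forb = false := by
      rw [pvAFlag_eq_false_iff]
      refine ⟨f, hf, ?_⟩
      rw [hlen]
      exact hfe.symm
    simp [hfalse] at h
  · have h' : pvAFlag t forb = false := Bool.eq_false_iff.2 h
    rw [h']
    symm
    rw [Bool.eq_false_iff]
    intro hall
    rw [pvBAllowed_eq_true_iff] at hall
    rcases (pvAFlag_eq_false_iff t forb).1 h' with ⟨f, hf, he⟩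
    have hle : f.toList.length ≤ t.length := by
      have := congrArg List.length he
      rw [List.length_take] at this
      omega
    refine hall f.toList.length hle ?_
    rw [he]
    exact List.mem_map.2 ⟨f, hf, rfl⟩

-- Shifting the accumulator of either counting fold.
lemma pvFoldA_shift (forb : List String) (l : List String) (b : Int) :
    l.foldl (fun c temps => if pvAFlag temps.toList forb then c else c + 1) b
      = b + l.foldl (fun c temps => if pvAFlag temps.toList forb then c else c + 1) 0 := by
  induction l generalizing b with
  | nil => simp
  | cons s rest ih =>
    simp only [List.foldl_cons]
    by_cases h : pvAFlag s.toList forb = true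
    · rw [if_pos h, if_pos h]; exact ih b
    · rw [if_neg h, if_neg h, ih (b + 1), ih (0 + 1)]
      ring

lemma pvFoldB_shift (forb : List String) (l : List String) (b : Int) :
    l.foldl (fun c s => if pvBAllowed (PySem.Set.ofList (forb.map String.toList)) s.toList then c + 1 else c) b
      = b + l.foldl (fun c s => if pvBAllowed (PySem.Set.ofList (forb.map String.toList)) s.toList then c + 1 else c) 0 := by
  induction l generalizing b with
  | nil => simp
  | cons s rest ih =>
    simp only [List.foldl_cons]
    by_cases h : pvBAllowed (PySem.Set.ofList (forb.map String.toList)) s.toList = true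
    · rw [if_pos h, if_pos h, ih (b + 1), ih (0 + 1)]
      ring
    · rw [if_neg h, if_neg h]; exact ih b

-- The two counts are complementary: flagged + allowed = length.
lemma pvCounts_sum (forb : List String) (l : List String) :
    l.foldl (fun c temps => if pvAFlag temps.toList forb then c else c + 1) 0
      + l.foldl (fun c s => if pvBAllowed (PySem.Set.ofList (forb.map String.toList)) s.toList then c + 1 else c) 0
      = (l.length : Int) := by
  induction l with
  | nil => simp
  | cons s rest ih =>
    simp only [List.foldl_cons, List.length_cons]
    rw [← pvFlag_eq_allowed forb s.toList]
    by_cases h : pvAFlag s.toList forb = true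
    · rw [if_pos h, if_pos h, pvFoldB_shift forb rest (0 + 1)]
      push_cast
      omega
    · rw [if_neg h, if_neg h, pvFoldA_shift forb rest (0 + 1)]
      push_cast
      omega

-- ===== VERDICT (by name: the statement is the Claim_ definition above) =====
theorem filter_forb_spec : Claim_equal_filter_forb := by
  intro seqs_all seqs_forb _
  show filter_forb seqs_all seqs_forb = filter_forb_alt seqs_all seqs_forb
  have := pvCounts_sum seqs_forb seqs_all
  simp only [filter_forb, filter_forb_alt]
  omega
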